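-- pv_equiv track=rewrite | github.com/jpanaro/DS_A_P | problems/AlgoMonster/Binary_Search/Newspapers/provided_solution.py | newspapers_split
-- ===== SOURCE A (Python) =====
-- from typing import List
--
-- def feasible(newspapers_read_times: List[int], num_coworkers: int, limit: int) -> bool:
--     # time to keep track of the current worker's time spent, num_workers to keep track of the number of coworkers used
--     time, num_workers = 0, 0
--     for read_time in newspapers_read_times:
--         # check if current time exceeds the given time limit
--         if time + read_time > limit:
--             time = 0
--             num_workers += 1
--         time += read_time
--     # edge case to check if we needed an extra worker at the end
--     if time != 0:
--         num_workers += 1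
--     # check if the number of workers we need is more than what we have
--     return num_workers <= num_coworkers
--
-- def newspapers_split(newspapers_read_times: List[int], num_coworkers: int) -> int:
--     low, high = max(newspapers_read_times), sum(newspapers_read_times)
--     while low <= high:
--         mid = (low + high) // 2
--         # helper function to check if a time works
--         if feasible(newspapers_read_times, num_coworkers, mid):
--             high = mid - 1
--         else:
--             low = mid + 1
--     return high + 1
-- ===== SOURCE B (Python) =====
-- def newspapers_split(newspapers_read_times, num_coworkers):
--     # prefix-sum table, built once and shared by every probe of the search
--     pref = [0]
--     for t in newspapers_read_times:
--         pref.append(pref[-1] + t)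
--
--     def enough(limit):
--         # Walk the prefix-sum table: 'base' is the prefix sum at the current
--         # reader's starting position, 'left' counts down the reader budget.
--         # Exits early as soon as the budget is exhausted.
--         left, base = num_coworkers, 0
--         for prev, cur in zip(pref, pref[1:]):
--             if cur - base > limit:
--                 left -= 1
--                 base = prev
--                 if left < 0:
--                     return False
--         return left >= (0 if pref[-1] == base else 1)
--
--     def locate(low, high):
--         if low > high:
--             return high + 1
--         mid = (low + high) // 2
--         return locate(low, mid - 1) if enough(mid) else locate(mid + 1, high)
--
--     return locate(max(newspapers_read_times), pref[-1])
-- ===== Notes on version B (the rewrite author's own statement) =====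
-- stated objective: alternative
-- what changed: B keeps A's bisection probe-for-probe -- the probe path is observable because the greedy feasibility test is not monotone on mixed-sign read times, so any exact re-implementation must follow it -- but restructures both levels: the while loop becomes a recursive descent, and A's running-time/worker scan becomes a walk over a prefix-sum table built once and shared by all probes, counting down a reader budget with an early exit once the budget is exhausted.
import Mathlib
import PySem

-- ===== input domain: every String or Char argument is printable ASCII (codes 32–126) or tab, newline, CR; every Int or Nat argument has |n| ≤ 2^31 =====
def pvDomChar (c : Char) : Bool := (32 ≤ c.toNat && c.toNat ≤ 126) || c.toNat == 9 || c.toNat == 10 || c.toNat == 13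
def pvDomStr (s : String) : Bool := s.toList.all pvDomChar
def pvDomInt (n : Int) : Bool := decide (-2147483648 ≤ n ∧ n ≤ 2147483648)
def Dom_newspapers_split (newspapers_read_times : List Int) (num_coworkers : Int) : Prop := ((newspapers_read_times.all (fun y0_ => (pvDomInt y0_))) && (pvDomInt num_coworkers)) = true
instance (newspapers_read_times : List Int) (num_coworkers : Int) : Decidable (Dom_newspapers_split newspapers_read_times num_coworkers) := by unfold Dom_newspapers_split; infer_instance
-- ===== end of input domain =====

-- B keeps A's bisection probe-for-probe (its probe path is observable on mixed-sign inputs,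
-- where the greedy test is non-monotone) but restructures both levels: a recursive descent
-- instead of the while loop, and a per-probe check that walks a prefix-sum table built once,
-- counting down a reader budget with an early exit, instead of A's running-time/worker scan.

-- ===== PORT A =====

/-- Port of A's helper `feasible`: fold the (time, num_workers) state over the list,
    then the final `time != 0` adjustment and the comparison with `num_coworkers`. -/
def pyFeasible (newspapers_read_times : List Int) (num_coworkers limit : Int) : Bool :=
  let fin := newspapers_read_times.foldl
    (fun (st : Int × Int) read_time =>
      if st.1 + read_time > limit then (read_time, st.2 + 1) else (st.1 + read_time, st.2))
    (0, 0)
  let num_workers := if fin.1 ≠ 0 then fin.2 + 1 else fin.2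
  decide (num_workers ≤ num_coworkers)

/-- Port of A's `while low <= high` bisection loop (returns `high + 1` when the loop ends). -/
def bsearchA (newspapers_read_times : List Int) (num_coworkers low high : Int) : Int :=
  if _h : low ≤ high then
    let mid := PySem.Int.floordiv (low + high) 2
    if pyFeasible newspapers_read_times num_coworkers mid then
      bsearchA newspapers_read_times num_coworkers low (mid - 1)
    else
      bsearchA newspapers_read_times num_coworkers (mid + 1) high
  else high + 1
termination_by (high + 1 - low).toNat
decreasing_by
  · have := PySem.Int.floordiv_two_mid_bounds _h
    omega
  · have := PySem.Int.floordiv_two_mid_bounds _h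
    omega

def newspapers_split (newspapers_read_times : List Int) (num_coworkers : Int) : Int :=
  -- `max(...)` raises ValueError on []; that input is excluded by Pre_ (getD 0 is dead there)
  let low := (PySem.List.max? newspapers_read_times (fun x => x)).getD 0
  let high := newspapers_read_times.sum
  bsearchA newspapers_read_times num_coworkers low high

-- ===== PORT B =====

/-- Source B: the prefix-sum table `pref`, built once by appending `pref[-1] + t`. -/
def prefSums (newspapers_read_times : List Int) : List Int :=
  newspapers_read_times.foldl
    (fun acc t => acc ++ [PySem.List.pyGetD acc (-1) 0 + t]) [0]
    -- acc is never empty, so pref[-1] never raises; getD 0 is dead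

/-- Source B: the `for prev, cur in zip(pref, pref[1:])` loop of `enough`, with the
    early `return False` once the reader budget `left` goes negative. -/
def enoughGo (limit last : Int) : List (Int × Int) → Int → Int → Bool
  | [], left, base => decide (left ≥ (if last = base then 0 else 1))
  | (prev, cur) :: rest, left, base =>
    if cur - base > limit then
      if left - 1 < 0 then false
      else enoughGo limit last rest (left - 1) prev
    else enoughGo limit last rest left base

/-- Source B: `enough(limit)`. -/
def enoughB (pref : List Int) (num_coworkers limit : Int) : Bool :=
  enoughGo limit (PySem.List.pyGetD pref (-1) 0)
    (pref.zip (PySem.List.slice pref (some 1) none)) num_coworkers 0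

/-- Source B: the recursive bisection `locate`. -/
def locateB (pref : List Int) (num_coworkers low high : Int) : Int :=
  if _h : low > high then high + 1
  else
    let mid := PySem.Int.floordiv (low + high) 2
    if enoughB pref num_coworkers mid then locateB pref num_coworkers low (mid - 1)
    else locateB pref num_coworkers (mid + 1) high
termination_by (high + 1 - low).toNat
decreasing_by
  · have := PySem.Int.floordiv_two_mid_bounds (by omega : low ≤ high)
    omega
  · have := PySem.Int.floordiv_two_mid_bounds (by omega : low ≤ high)
    omega

def newspapers_split_alt (newspapers_read_times : List Int) (num_coworkers : Int) : Int :=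
  let pref := prefSums newspapers_read_times
  locateB pref num_coworkers
    ((PySem.List.max? newspapers_read_times (fun x => x)).getD 0)
    (PySem.List.pyGetD pref (-1) 0)

-- ===== PRECONDITION & SPEC =====

-- Pre_ excludes only the empty list, on which Python A raises ValueError (max of an
-- empty sequence); B raises the same ValueError there.
def Pre_newspapers_split (newspapers_read_times : List Int) (num_coworkers : Int) : Prop :=
  newspapers_read_times ≠ []
instance (newspapers_read_times : List Int) (num_coworkers : Int) :
    Decidable (Pre_newspapers_split newspapers_read_times num_coworkers) := by
  unfold Pre_newspapers_split; infer_instance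

def pvWitness_newspapers_split : List Int × Int := ([3, 1, 2], 2)

def Spec_newspapers_split (newspapers_read_times : List Int) (num_coworkers : Int) (out : Int) : Prop :=
  out = newspapers_split_alt newspapers_read_times num_coworkers
instance (newspapers_read_times : List Int) (num_coworkers : Int) (out : Int) :
    Decidable (Spec_newspapers_split newspapers_read_times num_coworkers out) := by
  unfold Spec_newspapers_split; infer_instance

-- ===== CLAIM (what is proved, stated in full; the proofs are below) =====
def Claim_equal_newspapers_split : Prop := ∀ (newspapers_read_times : List Int) (num_coworkers : Int), Dom_newspapers_split newspapers_read_times num_coworkers → Pre_newspapers_split newspapers_read_times num_coworkers → Spec_newspapers_split newspapers_read_times num_coworkers (newspapers_split newspapers_read_times num_coworkers)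

-- ===== LEMMAS AND PROOFS =====

/-- The appending fold of Source B builds `scanl (+)`. -/
theorem prefSums_go (l : List Int) : ∀ (acc : List Int) (s : Int),
    l.foldl (fun acc t => acc ++ [PySem.List.pyGetD acc (-1) 0 + t]) (acc ++ [s])
      = acc ++ List.scanl (· + ·) s l := by
  induction l with
  | nil => intro acc s; simp [List.scanl]
  | cons x l ih =>
    intro acc s
    simp only [List.foldl_cons, PySem.List.pyGetD_neg_one_append_singleton, List.scanl]
    have h := ih (acc ++ [s]) (s + x)
    simpa using h

theorem prefSums_eq (l : List Int) : prefSums l = List.scanl (· + ·) 0 l := by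
  have h := prefSums_go l [] 0
  simpa [prefSums] using h

theorem scanl_ne_nil (l : List Int) (s : Int) : List.scanl (· + ·) s l ≠ [] := by
  cases l <;> simp [List.scanl_nil, List.scanl_cons]

theorem getLast_scanl (l : List Int) : ∀ (s : Int),
    PySem.List.pyGetD (List.scanl (· + ·) s l) (-1) 0 = s + l.sum := by
  induction l with
  | nil =>
    intro s
    rw [List.scanl_nil]
    simpa using PySem.List.pyGetD_neg_one_append_singleton (xs := []) (x := s) (d := 0)
  | cons x l ih =>
    intro s
    rw [List.scanl_cons,
        PySem.List.pyGetD_neg_one (s :: List.scanl (· + ·) (s + x) l) 0 (List.cons_ne_nil _ _),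
        List.getLast_cons (scanl_ne_nil l (s + x)),
        ← PySem.List.pyGetD_neg_one (List.scanl (· + ·) (s + x) l) 0 (scanl_ne_nil l (s + x)),
        ih (s + x)]
    simp [List.sum_cons]; ring

/-- Head step of the zipped prefix-pair list. -/
theorem zip_scanl_cons (m : List Int) (s x : Int) :
    (List.scanl (· + ·) s (x :: m)).zip ((List.scanl (· + ·) s (x :: m)).drop 1)
      = (s, s + x) ::
        ((List.scanl (· + ·) (s + x) m).zip ((List.scanl (· + ·) (s + x) m).drop 1)) := by
  cases m <;> simp [List.scanl_nil, List.scanl_cons]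

/-- A's worker counter never decreases along the fold. -/
theorem foldA_w_mono (limit : Int) (m : List Int) : ∀ (t w : Int),
    w ≤ (m.foldl
      (fun (st : Int × Int) read_time =>
        if st.1 + read_time > limit then (read_time, st.2 + 1) else (st.1 + read_time, st.2))
      (t, w)).2 := by
  induction m with
  | nil => intro t w; simp
  | cons x m ih =>
    intro t w
    simp only [List.foldl_cons]
    by_cases h : t + x > limit
    · simp only [if_pos h]; exact le_trans (by omega) (ih x (w + 1))
    · simp only [if_neg h]; exact ih (t + x) w

/-- Main correspondence: B's budget/anchor walk over the zipped prefix pairs computes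
    exactly A's feasibility verdict, state for state. -/
theorem enoughGo_eq_feas (k limit : Int) (m : List Int) : ∀ (s base t left w : Int),
    t = s - base → left = k - w →
    enoughGo limit (s + m.sum)
        ((List.scanl (· + ·) s m).zip ((List.scanl (· + ·) s m).drop 1)) left base
      = decide ((if (m.foldl
            (fun (st : Int × Int) read_time =>
              if st.1 + read_time > limit then (read_time, st.2 + 1) else (st.1 + read_time, st.2))
            (t, w)).1 ≠ 0
          then (m.foldl
            (fun (st : Int × Int) read_time =>
              if st.1 + read_time > limit then (read_time, st.2 + 1) else (st.1 + read_time, st.2))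
            (t, w)).2 + 1
          else (m.foldl
            (fun (st : Int × Int) read_time =>
              if st.1 + read_time > limit then (read_time, st.2 + 1) else (st.1 + read_time, st.2))
            (t, w)).2) ≤ k) := by
  induction m with
  | nil =>
    intro s base t left w ht hl
    rw [List.scanl_nil]
    simp only [List.sum_nil, add_zero, List.drop_succ_cons, List.drop_nil,
      List.zip_nil_right, enoughGo, List.foldl_nil]
    rcases eq_or_ne s base with h | h
    · rw [if_pos h]
      have ht0 : t = 0 := by omega
      simp [ht0]; omega
    · rw [if_neg h]
      have ht0 : t ≠ 0 := by omega
      simp [ht0]; omega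
  | cons x m ih =>
    intro s base t left w ht hl
    rw [zip_scanl_cons]
    simp only [enoughGo, List.foldl_cons, List.sum_cons]
    have hc : (s + x) - base > limit ↔ t + x > limit := by omega
    by_cases h : t + x > limit
    · rw [if_pos (hc.mpr h), if_pos h]
      by_cases hneg : left - 1 < 0
      · rw [if_pos hneg]
        -- budget exhausted: A's final worker count exceeds k as well
        have hw := foldA_w_mono limit m x (w + 1)
        symm
        rw [decide_eq_false_iff_not]
        intro habs
        split at habs <;> omega
      · rw [if_neg hneg]
        have h1 : s + (x + m.sum) = (s + x) + m.sum := by ring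
        rw [h1]
        exact ih (s + x) s x (left - 1) (w + 1) (by ring) (by omega)
    · rw [if_neg (fun hh => h (hc.mp hh)), if_neg h]
      have h1 : s + (x + m.sum) = (s + x) + m.sum := by ring
      rw [h1]
      exact ih (s + x) base (t + x) left w (by omega) (by omega)

/-- Pointwise equality of the two per-probe checks. -/
theorem enoughB_eq_pyFeasible (l : List Int) (k limit : Int) :
    enoughB (prefSums l) k limit = pyFeasible l k limit := by
  have hslice : PySem.List.slice (prefSums l) (some 1) none = (prefSums l).drop 1 := by
    exact_mod_cast PySem.List.slice_from_natCast (prefSums l) 1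
  have hmain := enoughGo_eq_feas k limit l 0 0 0 k 0 (by ring) (by ring)
  rw [enoughB, hslice, prefSums_eq, getLast_scanl]
  simpa [pyFeasible] using hmain

/-- The two bisections agree (their per-probe checks are pointwise equal). -/
theorem locateB_eq_bsearchA (l : List Int) (k : Int) : ∀ (N : Nat) (low high : Int),
    (high + 1 - low).toNat ≤ N →
    locateB (prefSums l) k low high = bsearchA l k low high := by
  intro N
  induction N with
  | zero =>
    intro low high hN
    have hlh : high < low := by omega
    rw [locateB, bsearchA]
    rw [dif_pos (by omega : low > high), dif_neg (by omega : ¬ low ≤ high)]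
  | succ N ih =>
    intro low high hN
    rw [locateB, bsearchA]
    by_cases hlh : low ≤ high
    · rw [dif_neg (by omega : ¬ low > high), dif_pos hlh]
      simp only [enoughB_eq_pyFeasible]
      have hmid := PySem.Int.floordiv_two_mid_bounds hlh
      by_cases hf : pyFeasible l k (PySem.Int.floordiv (low + high) 2)
      · rw [if_pos hf, if_pos hf]
        exact ih low (PySem.Int.floordiv (low + high) 2 - 1) (by omega)
      · rw [if_neg hf, if_neg hf]
        exact ih (PySem.Int.floordiv (low + high) 2 + 1) high (by omega)
    · rw [dif_pos (by omega : low > high), dif_neg hlh]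

theorem newspapers_split_eq_alt (l : List Int) (k : Int) :
    newspapers_split l k = newspapers_split_alt l k := by
  rw [newspapers_split, newspapers_split_alt]
  have hsum : PySem.List.pyGetD (prefSums l) (-1) 0 = l.sum := by
    rw [prefSums_eq, getLast_scanl]; ring
  rw [hsum]
  exact (locateB_eq_bsearchA l k _ _ _ (le_refl _)).symm

-- ===== VERDICT (by name: the statement is the Claim_ definition above) =====
theorem newspapers_split_spec : Claim_equal_newspapers_split := by
  intro l k _ _
  unfold Spec_newspapers_split
  exact newspapers_split_eq_alt l k
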